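-- pv_equiv track=rewrite | github.com/daniel-reich/ubiquitous-fiesta | GPodAAMFqz9sLWmAy_10.py | one_odd_one_even
-- ===== SOURCE A (Python) =====
-- def one_odd_one_even(n):
--   temp = str(n)
--   indiv = list(temp)
--   odd = 0
--   even = 0
--   for val in indiv:
--     if int(val) % 2 != 0 and int(val) != 0:
--       odd += 1
--     elif int(val) % 2 == 0:
--       even += 1
--   if even == 1 and odd == 1:
--     return True
--   else:
--     return False
-- ===== SOURCE B (Python) =====
-- def one_odd_one_even(n):
--   return 10 <= n <= 99 and (n // 10 + n % 10) % 2 == 1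
-- ===== Notes on version B (the rewrite author's own statement) =====
-- stated objective: alternative
-- what changed: B drops the digit-string scan entirely: a number has exactly one odd and one even digit iff it is a two-digit number whose digit sum (tens digit plus units digit) is odd, so B is one arithmetic range test plus a parity formula, with no str(n), no digit list and no loop.
import Mathlib
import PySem

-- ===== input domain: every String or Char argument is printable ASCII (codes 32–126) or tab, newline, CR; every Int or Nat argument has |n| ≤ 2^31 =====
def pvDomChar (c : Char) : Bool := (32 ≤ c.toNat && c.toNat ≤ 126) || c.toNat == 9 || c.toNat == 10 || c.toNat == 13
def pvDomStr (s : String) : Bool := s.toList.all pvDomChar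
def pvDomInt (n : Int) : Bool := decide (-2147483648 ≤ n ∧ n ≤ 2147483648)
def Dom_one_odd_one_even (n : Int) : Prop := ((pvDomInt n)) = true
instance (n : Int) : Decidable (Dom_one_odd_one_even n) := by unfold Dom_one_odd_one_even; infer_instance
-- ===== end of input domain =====

-- B replaces A's digit-string scan by one arithmetic formula: exactly one odd and one
-- even digit iff 10 ≤ n ≤ 99 and the digit sum n//10 + n%10 is odd.

-- int(val) for a single character val; inside Pre_ (0 ≤ n) every val is a decimal
-- digit, so the Python int() never raises and the `.getD 0` default is never reached.
def pvDigit (c : Char) : Int := (PySem.Int.ofChars? [c]).getD 0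

-- ===== PORT A =====
def one_odd_one_even (n : Int) : Bool :=
  let temp := PySem.Int.toStr n
  let indiv := temp.toList
  let oe : Int × Int := indiv.foldl (fun s val =>
    if pvDigit val % 2 ≠ 0 ∧ pvDigit val ≠ 0 then (s.1 + 1, s.2)
    else if pvDigit val % 2 = 0 then (s.1, s.2 + 1)
    else s) (0, 0)
  if oe.2 = 1 ∧ oe.1 = 1 then true else false

-- ===== PORT B =====
def one_odd_one_even_alt (n : Int) : Bool :=
  decide (10 ≤ n ∧ n ≤ 99) &&
    decide (PySem.Int.mod (PySem.Int.floordiv n 10 + PySem.Int.mod n 10) 2 = 1)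

-- ===== PRECONDITION & SPEC =====
-- Pre_ excludes negative n, on which the Python A raises ValueError at int('-')
def Pre_one_odd_one_even (n : Int) : Prop := 0 ≤ n
instance (n : Int) : Decidable (Pre_one_odd_one_even n) := by unfold Pre_one_odd_one_even; infer_instance
def pvWitness_one_odd_one_even : Int := 12

def Spec_one_odd_one_even (n : Int) (out : Bool) : Prop := out = one_odd_one_even_alt n
instance (n : Int) (out : Bool) : Decidable (Spec_one_odd_one_even n out) := by unfold Spec_one_odd_one_even; infer_instance

-- ===== CLAIM (what is proved, stated in full; the proofs are below) =====
def Claim_equal_one_odd_one_even : Prop := ∀ (n : Int), Dom_one_odd_one_even n → Pre_one_odd_one_even n → Spec_one_odd_one_even n (one_odd_one_even n)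
-- ===== LEMMAS AND PROOFS =====

-- proof-side recursive view of Nat.toDigits 10: most significant digit first
def pvDigs (n : Nat) : List Char :=
  if _h : n < 10 then [Nat.digitChar n]
  else pvDigs (n / 10) ++ [Nat.digitChar (n % 10)]
decreasing_by exact Nat.div_lt_self (by omega) (by omega)

theorem pvDigs_small {n : Nat} (h : n < 10) : pvDigs n = [Nat.digitChar n] := by
  rw [pvDigs, dif_pos h]

theorem pvDigs_step {n : Nat} (h : ¬ n < 10) :
    pvDigs n = pvDigs (n / 10) ++ [Nat.digitChar (n % 10)] := by
  rw [pvDigs, dif_neg h]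

theorem pvDigs_length_pos (n : Nat) : 0 < (pvDigs n).length := by
  by_cases h : n < 10
  · simp [pvDigs_small h]
  · simp [pvDigs_step h]

theorem toDigitsCore_eq_pvDigs : ∀ (f n : Nat) (ds : List Char),
    1 ≤ n → n < 10 ^ f → Nat.toDigitsCore 10 f n ds = pvDigs n ++ ds := by
  intro f
  induction f with
  | zero => intro n ds h1 h2; omega
  | succ f ih =>
    intro n ds h1 h2
    show (if n / 10 = 0 then Nat.digitChar (n % 10) :: ds
          else Nat.toDigitsCore 10 f (n / 10) (Nat.digitChar (n % 10) :: ds))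
        = pvDigs n ++ ds
    by_cases h : n / 10 = 0
    · have hn : n < 10 := by omega
      rw [if_pos h, pvDigs_small hn, Nat.mod_eq_of_lt hn]
      simp
    · have h10 : ¬ n < 10 := by omega
      have hlt : n / 10 < 10 ^ f := by
        rw [Nat.div_lt_iff_lt_mul (by omega)]
        calc n < 10 ^ (f + 1) := h2
          _ = 10 ^ f * 10 := by ring
      rw [if_neg h, ih (n / 10) _ (by omega) hlt, pvDigs_step h10]
      simp

theorem toDigits_eq_pvDigs (n : Nat) : Nat.toDigits 10 n = pvDigs n := by
  rcases Nat.eq_zero_or_pos n with h | h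
  · subst h; rw [pvDigs_small (by omega)]; decide
  · have hlt : n < 10 ^ (n + 1) := by
      calc n < 2 ^ n := Nat.lt_two_pow_self
        _ ≤ 10 ^ n := Nat.pow_le_pow_left (by omega) n
        _ ≤ 10 ^ (n + 1) := Nat.pow_le_pow_right (by omega) (by omega)
    simpa using toDigitsCore_eq_pvDigs (n + 1) n [] h hlt

theorem pvDigit_mod_two (c : Char) : pvDigit c % 2 = 0 ∨ pvDigit c % 2 = 1 :=
  Int.emod_two_eq _

-- the summed digit parities of a char list
def pvOdds (l : List Char) : Int := (l.map (fun c => pvDigit c % 2)).sum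

theorem pvFoldA_eq (l : List Char) : ∀ (odd even : Int),
    l.foldl (fun s val =>
      if pvDigit val % 2 ≠ 0 ∧ pvDigit val ≠ 0 then (s.1 + 1, s.2)
      else if pvDigit val % 2 = 0 then (s.1, s.2 + 1)
      else s) (odd, even)
    = (odd + pvOdds l, even + ((l.length : Int) - pvOdds l)) := by
  induction l with
  | nil => intro odd even; simp [pvOdds]
  | cons c cs ih =>
    intro odd even
    rcases pvDigit_mod_two c with h | h
    · have hc : ¬ (pvDigit c % 2 ≠ 0 ∧ pvDigit c ≠ 0) := by
        intro ⟨h1, _⟩; exact h1 h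
      simp only [List.foldl_cons, if_pos h, if_neg hc, ih]
      simp only [pvOdds, List.map_cons, List.sum_cons, h, List.length_cons]
      rw [Prod.mk.injEq]; constructor <;> (push_cast; ring)
    · have hne : pvDigit c ≠ 0 := by
        intro h0; rw [h0] at h; simp at h
      have hc : pvDigit c % 2 ≠ 0 ∧ pvDigit c ≠ 0 := ⟨by omega, hne⟩
      simp only [List.foldl_cons, if_pos hc, ih]
      simp only [pvOdds, List.map_cons, List.sum_cons, h, List.length_cons]
      rw [Prod.mk.injEq]; constructor <;> (push_cast; ring)

theorem pvDigit_digitChar (d : Nat) (h : d < 10) : pvDigit (Nat.digitChar d) = (d : Int) := by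
  interval_cases d <;> decide

theorem one_odd_one_even_eq (n : Int) (hn : 0 ≤ n) :
    one_odd_one_even n = one_odd_one_even_alt n := by
  set m : Nat := n.toNat with hm
  have hnm : n = (m : Int) := by omega
  have hchars : (PySem.Int.toStr n).toList = pvDigs m := by
    rw [PySem.Int.toList_toStr]
    show (if n < 0 then '-' :: Nat.toDigits 10 n.natAbs else Nat.toDigits 10 n.toNat) = pvDigs m
    rw [if_neg (by omega), ← hm, toDigits_eq_pvDigs]
  unfold one_odd_one_even
  simp only [hchars, pvFoldA_eq]
  have hA : (if (0 : Int) + (((pvDigs m).length : Int) - pvOdds (pvDigs m)) = 1 ∧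
        (0 : Int) + pvOdds (pvDigs m) = 1 then true else false)
      = decide (((pvDigs m).length : Int) = 2 ∧ pvOdds (pvDigs m) = 1) := by
    by_cases h : ((pvDigs m).length : Int) = 2 ∧ pvOdds (pvDigs m) = 1
    · rw [if_pos (by omega), decide_eq_true_iff.mpr h]
    · rw [if_neg (by omega), eq_comm, decide_eq_false_iff_not.mpr h]
  rw [hA]
  unfold one_odd_one_even_alt
  by_cases h10 : m < 10
  · -- one digit: both sides false
    rw [pvDigs_small h10]
    have : ¬ (10 ≤ n ∧ n ≤ 99) := by omega
    simp [this]
  · by_cases h99 : m ≤ 99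
    · -- two digits
      have hq : m / 10 < 10 := by omega
      have hr : m % 10 < 10 := Nat.mod_lt _ (by omega)
      rw [pvDigs_step h10, pvDigs_small hq]
      have hguard : 10 ≤ n ∧ n ≤ 99 := by omega
      have hdiv : PySem.Int.floordiv n 10 = ((m / 10 : Nat) : Int) := by
        show Int.fdiv n 10 = _
        rw [Int.fdiv_eq_ediv, if_pos (Or.inl (by norm_num : (0:Int) ≤ 10))]
        omega
      have hmod : PySem.Int.mod n 10 = ((m % 10 : Nat) : Int) := by
        show Int.fmod n 10 = _
        rw [Int.fmod_eq_emod, if_pos (Or.inl (by norm_num : (0:Int) ≤ 10))]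
        omega
      rw [hdiv, hmod]
      simp only [pvOdds, List.map_append, List.map_cons, List.map_nil, List.sum_append,
        List.sum_cons, List.sum_nil, List.length_append, List.length_cons, List.length_nil,
        pvDigit_digitChar _ hq, pvDigit_digitChar _ hr, decide_eq_true_iff.mpr hguard,
        Bool.true_and]
      have e1 : ((m / 10 : Nat) : Int) % 2 = ((m / 10 % 2 : Nat) : Int) := by push_cast; ring_nf
      have e2 : ((m % 10 : Nat) : Int) % 2 = ((m % 10 % 2 : Nat) : Int) := by push_cast; ring_nf
      have hsum : PySem.Int.mod (((m / 10 : Nat) : Int) + ((m % 10 : Nat) : Int)) 2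
          = (((m / 10 + m % 10) % 2 : Nat) : Int) := by
        show Int.fmod _ 2 = _
        rw [Int.fmod_eq_emod, if_pos (Or.inl (by norm_num : (0:Int) ≤ 2))]
        omega
      rw [hsum]
      have : ((((m / 10 + m % 10) % 2 : Nat) : Int) = 1)
          ↔ (((1 : Nat) + 1 : Int) = 2 ∧ ((m / 10 : Nat) : Int) % 2 + ((m % 10 : Nat) : Int) % 2 + 0 = 1) := by
        rw [e1, e2]
        constructor
        · intro h; exact ⟨by norm_num, by omega⟩
        · intro ⟨_, h⟩; omega
      simp only [decide_eq_decide]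
      omega
    · -- three or more digits: both sides false
      have h100 : ¬ m < 10 ∧ ¬ m / 10 < 10 := ⟨h10, by omega⟩
      have hlen : 3 ≤ (pvDigs m).length := by
        rw [pvDigs_step h100.1, pvDigs_step h100.2]
        have := pvDigs_length_pos (m / 10 / 10)
        simp; omega
      have hg : ¬ (10 ≤ n ∧ n ≤ 99) := by omega
      have hlen' : ¬ (((pvDigs m).length : Int) = 2 ∧ pvOdds (pvDigs m) = 1) := by
        intro ⟨h2, _⟩; omega
      simp [hg, hlen']

-- ===== VERDICT (by name: the statement is the Claim_ definition above) =====
theorem one_odd_one_even_spec : Claim_equal_one_odd_one_even := by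
  intro n _ hp
  unfold Spec_one_odd_one_even
  exact one_odd_one_even_eq n hp
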